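-- pv_equiv track=rewrite | github.com/komatiraju032/zspotify | zspotify/app.py | check_for_allowed_types
-- ===== SOURCE A (Python) =====
-- from typing import List
--
-- def check_for_allowed_types(splits, split, current_index) -> List[str]:
--     """Checks for the allowed types in users input"""
--     allowed_types = ['track', 'playlist', 'album', 'artist']
--     passed_types = []
--     for index in range(current_index + 1, len(splits)):
--         if splits[index][0] == '-':
--             break
--
--         if splits[index] not in allowed_types:
--             types = '\n'.join(allowed_types)
--             raise ValueError(f'Parameters passed after {split}'
--                              f' option must be from this list:\n{types}')
--
--         passed_types.append(splits[index])
--     return passed_types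
-- ===== SOURCE B (Python) =====
-- def check_for_allowed_types(splits, split, current_index):
--     """Checks for the allowed types in users input"""
--     allowed_types = ['track', 'playlist', 'album', 'artist']
--     tail = splits[current_index + 1:]
--     stop = next((i for i in range(len(tail)) if tail[i][0] == '-'), len(tail))
--     passed_types = tail[:stop]
--     if any(s not in allowed_types for s in passed_types):
--         types = '\n'.join(allowed_types)
--         raise ValueError(f'Parameters passed after {split}'
--                          f' option must be from this list:\n{types}')
--     return passed_types
-- ===== Notes on version B (the rewrite author's own statement) =====
-- stated objective: alternative
-- what changed: A's single fused loop (index-range scan that breaks on '-', validates and appends element by element) is replaced by slice-then-takewhile collection followed by a separate membership-validation pass over the collected list.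
-- outside the precondition, e.g. on check_for_allowed_types(['track'], 'x', -2): A returns ['track', 'track'], B returns ['track']
import Mathlib
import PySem

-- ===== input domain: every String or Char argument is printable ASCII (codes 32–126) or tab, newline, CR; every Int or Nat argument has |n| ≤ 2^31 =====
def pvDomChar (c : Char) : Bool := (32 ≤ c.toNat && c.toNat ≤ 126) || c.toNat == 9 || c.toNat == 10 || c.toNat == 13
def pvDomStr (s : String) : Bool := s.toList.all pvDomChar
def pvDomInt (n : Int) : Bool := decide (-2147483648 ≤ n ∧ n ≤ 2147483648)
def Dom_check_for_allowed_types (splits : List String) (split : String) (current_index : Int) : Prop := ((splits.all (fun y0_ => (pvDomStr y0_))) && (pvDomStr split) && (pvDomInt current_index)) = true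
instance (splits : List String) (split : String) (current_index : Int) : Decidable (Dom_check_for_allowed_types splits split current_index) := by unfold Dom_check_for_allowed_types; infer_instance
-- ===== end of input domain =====

-- B replaces A's fused scan-validate-append loop by a slice + takewhile collection and a
-- separate validation pass (objective: alternative decomposition, same cost).

-- ===== PORT A =====
def pvAllowed : List String := ["track", "playlist", "album", "artist"]

-- the for-loop of A: state = passed_types so far; `none`/bad cases are Python raises, excluded by Pre_
def pvGoA (splits : List String) : List Int → List String → List String
  | [], acc => acc
  | i :: rest, acc =>
    match PySem.List.pyGet? splits i with
    | none => acc      -- IndexError on splits[index] (outside Pre_)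
    | some s =>
      match PySem.Str.pyGet? s 0 with
      | none => acc    -- IndexError on splits[index][0] (outside Pre_)
      | some c =>
        if c = '-' then acc
        else if s ∈ pvAllowed then pvGoA splits rest (acc ++ [s])
        else acc       -- ValueError (outside Pre_)

def check_for_allowed_types (splits : List String) (split : String) (current_index : Int) : List String :=
  pvGoA splits (PySem.List.pyRange (current_index + 1) (splits.length : Int) 1) []

-- ===== PORT B =====
-- stop = next((i for i in range(len(tail)) if tail[i][0] == '-'), len(tail));
-- the structural scan below visits tail[0], tail[1], … exactly as the index scan does
-- (an empty string makes Python raise IndexError here; that input is outside Pre_)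
def pvStop : List String → Nat
  | [] => 0
  | s :: rest =>
    match PySem.Str.pyGet? s 0 with
    | none => pvStop rest + 1
    | some c => if c = '-' then 0 else pvStop rest + 1

def check_for_allowed_types_alt (splits : List String) (split : String) (current_index : Int) : List String :=
  let tail := PySem.List.slice splits (some (current_index + 1)) none
  let passed_types := tail.take (pvStop tail)
  if passed_types.any (fun s => ¬ (s ∈ (["track", "playlist", "album", "artist"] : List String))) then []   -- ValueError (outside Pre_)
  else passed_types

-- ===== PRECONDITION & SPEC =====
def pvScanPred (s : String) : Bool := s.toList.head? != some '-'

-- Pre_ restricts to the natural domain current_index ≥ -1 (a negative current_index makes A rescan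
-- the list tail via Python's negative-index wraparound, outside the function's purpose), and
-- excludes the inputs on which A raises (an empty string before the first '-'-element gives
-- IndexError, an element not in the allowed list gives ValueError).
def Pre_check_for_allowed_types (splits : List String) (split : String) (current_index : Int) : Prop :=
  -1 ≤ current_index ∧
  ∀ s ∈ (splits.drop (current_index + 1).toNat).takeWhile pvScanPred,
    s ∈ (["track", "playlist", "album", "artist"] : List String)

instance (splits : List String) (split : String) (current_index : Int) : Decidable (Pre_check_for_allowed_types splits split current_index) := by unfold Pre_check_for_allowed_types; infer_instance

def pvWitness_check_for_allowed_types : List String × String × Int := (["-d", "track"], "-d", 0)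

def Spec_check_for_allowed_types (splits : List String) (split : String) (current_index : Int) (out : List String) : Prop := out = check_for_allowed_types_alt splits split current_index
instance (splits : List String) (split : String) (current_index : Int) (out : List String) : Decidable (Spec_check_for_allowed_types splits split current_index out) := by unfold Spec_check_for_allowed_types; infer_instance

-- ===== CLAIM (what is proved, stated in full; the proofs are below) =====
def Claim_equal_check_for_allowed_types : Prop := ∀ (splits : List String) (split : String) (current_index : Int), Dom_check_for_allowed_types splits split current_index → Pre_check_for_allowed_types splits split current_index → Spec_check_for_allowed_types splits split current_index (check_for_allowed_types splits split current_index)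

-- ===== LEMMAS AND PROOFS =====

-- proof-side restatement of A's loop as structural recursion on the dropped tail
def pvGoA' : List String → List String → List String
  | [], acc => acc
  | s :: rest, acc =>
    match PySem.Str.pyGet? s 0 with
    | none => acc
    | some c =>
      if c = '-' then acc
      else if s ∈ pvAllowed then pvGoA' rest (acc ++ [s])
      else acc

lemma pvStr_pyGet_zero (s : String) : PySem.Str.pyGet? s 0 = s.toList.head? := by
  simp [PySem.Str.pyGet?, PySem.List.pyGet?_zero, List.head?_eq_getElem?]

lemma pvGoA_eq_goA'_aux (splits : List String) : ∀ (n k : Nat) (acc : List String),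
    splits.length - k = n →
    pvGoA splits (PySem.List.pyRange (k : Int) (splits.length : Int) 1) acc
      = pvGoA' (splits.drop k) acc := by
  intro n
  induction n with
  | zero =>
    intro k acc hn
    have hle : splits.length ≤ k := by omega
    have h1 : PySem.List.pyRange (k : Int) (splits.length : Int) 1 = [] := by
      rw [List.eq_nil_iff_forall_not_mem]
      intro i hi
      rw [PySem.List.mem_pyRange_one] at hi
      omega
    rw [h1, List.drop_eq_nil_of_le hle]
    rfl
  | succ n ih =>
    intro k acc hn
    have hlt : k < splits.length := by omega
    have hltI : (k : Int) < (splits.length : Int) := by exact_mod_cast hlt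
    rw [PySem.List.pyRange_one_cons hltI]
    rw [List.drop_eq_getElem_cons hlt]
    have hget : PySem.List.pyGet? splits (k : Int) = some splits[k] := by
      simp [PySem.List.pyGet?_natCast, List.getElem?_eq_getElem hlt]
    simp only [pvGoA, pvGoA', hget]
    cases hc : PySem.Str.pyGet? splits[k] 0 with
    | none => rfl
    | some c =>
      by_cases hdash : c = '-'
      · simp [hdash]
      · by_cases hmem : splits[k] ∈ pvAllowed
        · simp only [if_neg hdash, if_pos hmem]
          have hcast : (k : Int) + 1 = ((k + 1 : Nat) : Int) := by push_cast; ring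
          rw [hcast]
          exact ih (k + 1) _ (by omega)
        · simp [hdash, hmem]

lemma pvGoA_eq_goA' (splits : List String) (k : Nat) (acc : List String) :
    pvGoA splits (PySem.List.pyRange (k : Int) (splits.length : Int) 1) acc
      = pvGoA' (splits.drop k) acc :=
  pvGoA_eq_goA'_aux splits (splits.length - k) k acc rfl

lemma pvTake_stop_eq_takeWhile : ∀ (tail : List String),
    tail.take (pvStop tail) = tail.takeWhile pvScanPred
  | [] => rfl
  | s :: rest => by
    have hh := pvStr_pyGet_zero s
    simp only [pvStop, List.takeWhile_cons]
    cases hc : PySem.Str.pyGet? s 0 with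
    | none =>
      have hps : pvScanPred s = true := by
        simp [pvScanPred, hh ▸ hc]
      simp [hps, List.take_succ_cons, pvTake_stop_eq_takeWhile rest]
    | some c =>
      by_cases hdash : c = '-'
      · have hps : pvScanPred s = false := by
          subst hdash; simp [pvScanPred, hh ▸ hc]
        simp [hps, hdash]
      · have hps : pvScanPred s = true := by
          simp [pvScanPred, hh ▸ hc, hdash]
        simp [hps, hdash, List.take_succ_cons, pvTake_stop_eq_takeWhile rest]

lemma pvGoA'_eq : ∀ (tail acc : List String),
    (∀ s ∈ tail.takeWhile pvScanPred, s ∈ (["track", "playlist", "album", "artist"] : List String)) →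
    pvGoA' tail acc = acc ++ tail.takeWhile pvScanPred
  | [], acc, _ => by simp [pvGoA']
  | s :: rest, acc, H => by
    have hh := pvStr_pyGet_zero s
    simp only [pvGoA', List.takeWhile_cons]
    cases hc : PySem.Str.pyGet? s 0 with
    | none =>
      have hps : pvScanPred s = true := by simp [pvScanPred, hh ▸ hc]
      have hmem : s ∈ (["track", "playlist", "album", "artist"] : List String) := by
        refine H s ?_
        simp [hps]
      -- every allowed string is nonempty, contradicting pyGet? s 0 = none
      have hne : PySem.Str.pyGet? s 0 ≠ none := by fin_cases hmem <;> decide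
      exact absurd hc hne
    | some c =>
      by_cases hdash : c = '-'
      · have hps : pvScanPred s = false := by
          subst hdash; simp [pvScanPred, hh ▸ hc]
        simp [hps, hdash]
      · have hps : pvScanPred s = true := by simp [pvScanPred, hh ▸ hc, hdash]
        have hmem : s ∈ pvAllowed := by
          refine H s ?_
          simp [hps]
        have htl : ∀ x ∈ rest.takeWhile pvScanPred,
            x ∈ (["track", "playlist", "album", "artist"] : List String) := by
          intro x hx
          refine H x ?_
          simp [hps, hx]
        simp only [if_neg hdash, if_pos hmem, hps]
        rw [pvGoA'_eq rest (acc ++ [s]) htl]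
        simp

-- ===== VERDICT (by name: the statement is the Claim_ definition above) =====
theorem check_for_allowed_types_spec : Claim_equal_check_for_allowed_types := by
  intro splits split ci _ hpre
  obtain ⟨hci, H⟩ := hpre
  unfold Spec_check_for_allowed_types check_for_allowed_types check_for_allowed_types_alt
  obtain ⟨k, hk⟩ : ∃ k : Nat, ci + 1 = (k : Int) :=
    ⟨(ci + 1).toNat, (Int.toNat_of_nonneg (by omega)).symm⟩
  rw [hk] at H ⊢
  simp only [Int.toNat_natCast] at H
  simp only [PySem.List.slice_from_natCast]
  rw [pvGoA_eq_goA' splits k [], pvGoA'_eq _ _ H, pvTake_stop_eq_takeWhile]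
  have hany : ((splits.drop k).takeWhile pvScanPred).any
      (fun s => decide (¬ (s ∈ (["track", "playlist", "album", "artist"] : List String)))) = false := by
    simp only [List.any_eq_false, decide_eq_true_eq, not_not]
    intro s hs
    exact H s hs
  rw [hany]
  simp
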